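/-
  THE SHADOW MEMORY, AS FACTS ABOUT THE FLAT MEMORY `User.Mem`.

  gcc -fsanitize=kernel-address -fasan-shadow-offset=0xC00000 puts, before every memory access of the instrumented code, a
  call `__asan_loadK_noabort(addr)` / `__asan_storeK_noabort(addr)` (c/asan_rt.c). One SHADOW BYTE for every 8-byte GRANULE:

        s = the byte at C00000H + addr / 8       s = 0        all 8 bytes of the granule may be accessed
                                                 1 ≤ s ≤ 7    only the first s bytes
                                                 s ≥ 128      none (the runtime reads s as a signed char: negative)

  The machine has 16 MB, so there are 200000H granules and the shadow is [C00000H, E00000H).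

      shadowAddr g          the address of the shadow byte of granule g
      shadowOf mem g        that byte, as a number 0 … 255            shadowByte mem a = shadowOf mem (a / 8)
      ByteOK mem a          the runtime's test of ONE byte (`byte_bad` of asan_rt.c, negated)
      GranOK mem a          the same with s ≤ 7: what the proof MAINTAINS of a live byte (no value 8 … 127 is ever written)
      Accessible mem a n    `range_bad(a, n) == 0`: what `__asan_load16 / store16 / loadN / storeN` decide     (n ≥ 1)
      AccessibleSmall …     `small_bad(a, n) == 0`: what `__asan_load1 … 8 / store1 … 8` decide                (1 ≤ n ≤ 8)
      Covers Live mem       every byte of the set `Live` is `GranOK`, and `Live` lies in [100000H, C00000H)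
      Sealed mem            no byte below 1 MB and no byte from C00000H up (the shadow itself, and the 2 MB above it) is `ByteOK`
      shadowSpan lo hi      the shadow bytes of [lo, hi) as a footprint window

  (`__asan_loadN / storeN_noabort(a, 0)` return at once, without a check: `Accessible` is about n ≥ 1.)

  WHAT THE PROOF DOES WITH THEM. At a check site the walker must show that the check passes: `Covers.accessible` from the
  invariant `Covers Live mem` and "the n bytes at a are live" (`InLive`) — the latter is the real content of the safety proof.
  After a passed check, the access that follows needs its side condition `L.Has a n`: `Accessible.has` gives it from `Sealed`
  (ACCESSIBLE ⇒ INSIDE THE USER REGION, and outside the shadow). Stores outside the shadow keep every shadow fact (`….eqOn`,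
  with `Mem.EqOn C00000H E00000H`); a store of shadow bytes changes exactly those granules (`shadowOf_write`, `shadowOf_writeLE`,
  `Covers.write`, `Sealed.write`).

  Addresses of data are NUMBERS here (`a : Nat`, for a register `r`: `(u.reg r).toNat`); the shadow's own addresses are words.
-/
import X86.Derived.User.Frame
import X86.Derived.User.Start
namespace Asan
open X86 X86.User

/-! ### A byte of a little-endian store (missing from X86/Derived/User/Mem.lean) -/

/-- Byte `i` of what `writeLE a n v` stored: byte `i` of `v`. -/
theorem read_writeLE_in (f : Mem) (a : Word) (n v i : Nat) (hn : n ≤ 2 ^ 64) (hi : i < n) :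
    (f.writeLE a n v).read (a + UInt64.ofNat i) = UInt8.ofNat (v / 256 ^ i % 256) := by
  induction n generalizing f a v i with
  | zero => omega
  | succ n ih =>
    simp only [Mem.writeLE]
    cases i with
    | zero =>
      have hhead : ∀ j, j < n → a + 1 + UInt64.ofNat j ≠ a := by
        intro j hj
        rw [Mem.add_ofNat_succ]
        exact PhysMem.add_ofNat_ne_self a (j + 1) (by omega) (by omega)
      simp only [UInt64.reduceOfNat, UInt64.add_zero, Nat.pow_zero, Nat.div_one]
      rw [Mem.read_writeLE_other _ _ _ _ _ hhead, Mem.read_write_same]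
    | succ i =>
      rw [← Mem.add_ofNat_succ, ih _ _ _ i (by omega) (by omega)]
      rw [Nat.div_div_eq_div_mul, Nat.pow_succ, Nat.mul_comm]

/-! ### Where the shadow is -/

/-- The address of the shadow byte of granule `g` (the 8 bytes from `8 * g`). -/
def shadowAddr (g : Nat) : Word := UInt64.ofNat (0xC00000 + g)

/-- The shadow byte of granule `g`, as a number 0 … 255 (what `movzx` / `movsx` of the check routines load). -/
def shadowOf (mem : Mem) (g : Nat) : Nat := (mem.read (shadowAddr g)).toNat

/-- The shadow byte of the granule that contains address `a`. -/
def shadowByte (mem : Mem) (a : Nat) : Nat := shadowOf mem (a / 8)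

theorem shadowAddr_toNat (g : Nat) (hg : g < 0x200000) : (shadowAddr g).toNat = 0xC00000 + g := by
  unfold shadowAddr
  rw [UInt64.toNat_ofNat']
  omega

/-- A word whose value is `C00000H + g` IS the shadow address of granule `g` (the form a walker meets: an address computed by
`shr 3` and `add 0xC00000`). -/
theorem eq_shadowAddr (p : Word) (g : Nat) (h : p.toNat = 0xC00000 + g) : p = shadowAddr g := by
  apply UInt64.toNat_inj.mp
  unfold shadowAddr
  rw [UInt64.toNat_ofNat', h]
  have := p.toNat_lt
  omega

theorem shadowAddr_add (g i : Nat) : shadowAddr g + UInt64.ofNat i = shadowAddr (g + i) := by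
  unfold shadowAddr
  rw [← Nat.add_assoc]
  exact (UInt64.ofNat_add _ _).symm

theorem shadowAddr_ne (g g' : Nat) (hg : g < 0x200000) (hg' : g' < 0x200000) (h : g ≠ g') : shadowAddr g ≠ shadowAddr g' := by
  intro e
  have := congrArg UInt64.toNat e
  rw [shadowAddr_toNat g hg, shadowAddr_toNat g' hg'] at this
  omega

/-- The shadow byte as the one-byte load the check routines do. -/
theorem readLE_shadowAddr (mem : Mem) (g : Nat) : mem.readLE (shadowAddr g) 1 = shadowOf mem g :=
  Mem.readLE_one mem (shadowAddr g)

/-! ### The runtime's tests -/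

/-- One byte may be accessed, for a shadow VALUE `s`, as the proof maintains it: `s = 0`, or `s ≤ 7` and the byte is among the
first `s` of its granule. -/
def GranOKv (s a : Nat) : Prop := s = 0 ∨ (a % 8 < s ∧ s < 8)

/-- One byte may be accessed, for a shadow value `s`, AS THE RUNTIME TESTS IT (`byte_bad`, negated: `s == 0`, or
`(signed char)(addr & 7) < (signed char) s`, that is `s` positive as a signed char and greater than `a % 8`). -/
def ByteOKv (s a : Nat) : Prop := s = 0 ∨ (a % 8 < s ∧ s < 128)

/-- The byte at `a` is accessible, strictly (shadow value 0 … 7). -/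
def GranOK (mem : Mem) (a : Nat) : Prop := GranOKv (shadowByte mem a) a

/-- The byte at `a` passes the runtime's test. -/
def ByteOK (mem : Mem) (a : Nat) : Prop := ByteOKv (shadowByte mem a) a

theorem GranOK.byteOK {mem : Mem} {a : Nat} (h : GranOK mem a) : ByteOK mem a := by
  unfold GranOK GranOKv at h
  unfold ByteOK ByteOKv
  omega

/-- **`range_bad(a, n) == 0`** (asan_rt.c), for `n ≥ 1`: the range ends at or below 16 MB (`addr < MEM_TOP` and
`size ≤ MEM_TOP - addr`), every granule before the one of the last byte has shadow 0, and the last byte passes the byte test.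
Decided by `__asan_load16 / store16 / loadN / storeN_noabort`. -/
structure Accessible (mem : Mem) (a n : Nat) : Prop where
  top : a + n ≤ 0x1000000
  full : ∀ g, a / 8 ≤ g → g < (a + n - 1) / 8 → shadowOf mem g = 0
  last : ByteOK mem (a + n - 1)

/-- **`small_bad(a, n) == 0`** (asan_rt.c), for `1 ≤ n ≤ 8`: the same with the address ceiling of the small checks,
`addr < MEM_TOP - 16`. Decided by `__asan_load1 / 2 / 4 / 8` and `__asan_store1 / 2 / 4 / 8_noabort`. -/
structure AccessibleSmall (mem : Mem) (a n : Nat) : Prop where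
  ceiling : a < 0xFFFFF0
  acc : Accessible mem a n

/-- `small_bad` word for word: ceiling; if the access meets two granules the first has shadow 0; the last byte passes. -/
theorem accessibleSmall_iff (mem : Mem) (a n : Nat) (h1 : 1 ≤ n) (h8 : n ≤ 8) :
    AccessibleSmall mem a n ↔
      a < 0xFFFFF0 ∧ (a / 8 ≠ (a + n - 1) / 8 → shadowByte mem a = 0) ∧ ByteOK mem (a + n - 1) := by
  constructor
  · intro h
    refine ⟨h.ceiling, ?_, h.acc.last⟩
    intro hne
    exact h.acc.full (a / 8) (Nat.le_refl _) (by omega)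
  · intro h
    obtain ⟨hc, hfirst, hlast⟩ := h
    refine ⟨hc, ?_, ?_, hlast⟩
    · omega
    · intro g hg1 hg2
      have e : g = a / 8 := by omega
      rw [e]
      exact hfirst (by omega)

/-- Every byte of an accessible range passes the runtime's byte test. -/
theorem Accessible.byteOK {mem : Mem} {a n : Nat} (h : Accessible mem a n) (i : Nat) (hi : i < n) : ByteOK mem (a + i) := by
  by_cases hg : (a + i) / 8 < (a + n - 1) / 8
  · have hz := h.full ((a + i) / 8) (by omega) hg
    unfold ByteOK ByteOKv shadowByte
    exact Or.inl hz
  · have hsame : (a + i) / 8 = (a + n - 1) / 8 := by omega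
    have hlast := h.last
    unfold ByteOK ByteOKv shadowByte at *
    rw [hsame]
    omega

/-- **Bytes that are all strictly accessible form an accessible range** (what `Covers` gives at a check site). -/
theorem Accessible.of_granOK {mem : Mem} {a n : Nat} (hn : 0 < n) (htop : a + n ≤ 0x1000000)
    (h : ∀ i, i < n → GranOK mem (a + i)) : Accessible mem a n := by
  refine ⟨htop, ?_, ?_⟩
  · intro g hg1 hg2
    have hb := h (8 * g + 7 - a) (by omega)
    have e : a + (8 * g + 7 - a) = 8 * g + 7 := by omega
    rw [e] at hb
    unfold GranOK GranOKv shadowByte at hb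
    have e2 : (8 * g + 7) / 8 = g := by omega
    rw [e2] at hb
    omega
  · have hb := h (n - 1) (by omega)
    have e : a + (n - 1) = a + n - 1 := by omega
    rw [e] at hb
    exact hb.byteOK

/-! ### Live bytes -/

/-- The `n` bytes at `a` belong to the set `Live`. -/
def InLive (Live : Nat → Prop) (a n : Nat) : Prop := ∀ i, i < n → Live (a + i)

theorem InLive.sub {Live : Nat → Prop} {a n : Nat} (h : InLive Live a n) (b k : Nat) (h1 : a ≤ b) (h2 : b + k ≤ a + n) :
    InLive Live b k := by
  intro i hi
  have := h (b - a + i) (by omega)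
  have e : a + (b - a + i) = b + i := by omega
  rw [e] at this
  exact this

theorem InLive.mono {Live Live' : Nat → Prop} {a n : Nat} (h : InLive Live a n) (hl : ∀ x, Live x → Live' x) :
    InLive Live' a n :=
  fun i hi => hl _ (h i hi)

/-- **The shadow covers the live bytes**: every byte of `Live` is strictly accessible, and `Live` lies inside the program's
data space `[100000H, C00000H)` (image, parameters, input, output, stack, arena: everything but the shadow). -/
structure Covers (Live : Nat → Prop) (mem : Mem) : Prop where
  inside : ∀ a, Live a → 0x100000 ≤ a ∧ a < 0xC00000
  ok : ∀ a, Live a → GranOK mem a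

/-- Poisoning shrinks the live set. -/
theorem Covers.mono {Live Live' : Nat → Prop} {mem : Mem} (hc : Covers Live mem) (h : ∀ a, Live' a → Live a) :
    Covers Live' mem :=
  ⟨fun a ha => hc.inside a (h a ha), fun a ha => hc.ok a (h a ha)⟩

/-- **A check of live bytes passes** (16-byte and N-byte checks). -/
theorem Covers.accessible {Live : Nat → Prop} {mem : Mem} (hc : Covers Live mem) {a n : Nat} (hn : 0 < n)
    (h : InLive Live a n) : Accessible mem a n := by
  have hlast := hc.inside (a + (n - 1)) (h (n - 1) (by omega))
  exact Accessible.of_granOK hn (by omega) (fun i hi => hc.ok _ (h i hi))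

/-- **A check of live bytes passes** (1-, 2-, 4-, 8-byte checks). -/
theorem Covers.accessibleSmall {Live : Nat → Prop} {mem : Mem} (hc : Covers Live mem) {a n : Nat} (hn : 0 < n)
    (h : InLive Live a n) : AccessibleSmall mem a n := by
  have hfirst := hc.inside (a + 0) (h 0 hn)
  exact ⟨by omega, hc.accessible hn h⟩

/-! ### Accessible ⇒ inside the user region -/

/-- **The shadow is sealed**: no byte below 1 MB, and no byte from C00000H up to 16 MB (the shadow itself and the 2 MB above it),
passes the byte test: their shadow bytes are negative as signed chars. True of the start file; kept by every store of the
program, because shadow stores only go to the shadow of `[100000H, C00000H)`, that is to granules `[20000H, 180000H)`. -/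
def Sealed (mem : Mem) : Prop :=
  ∀ g, g < 0x200000 → (g < 0x20000 ∨ 0x180000 ≤ g) → 128 ≤ shadowOf mem g

theorem Sealed.not_byteOK {mem : Mem} (hs : Sealed mem) (a : Nat) (ha : a < 0x1000000) (hout : a < 0x100000 ∨ 0xC00000 ≤ a) :
    ¬ ByteOK mem a := by
  intro hb
  have := hs (a / 8) (by omega) (by omega)
  unfold ByteOK ByteOKv shadowByte at hb
  omega

/-- **An accessible range lies in `[100000H, C00000H)`**: inside the user region, clear of the shadow. -/
theorem Accessible.inside {mem : Mem} {a n : Nat} (h : Accessible mem a n) (hs : Sealed mem) (hn : 0 < n) :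
    0x100000 ≤ a ∧ a + n ≤ 0xC00000 := by
  have htop := h.top
  have h0 := h.byteOK 0 hn
  have hl := h.last
  have e0 : a + 0 = a := rfl
  rw [e0] at h0
  constructor
  · apply Classical.byContradiction
    intro hlt
    exact hs.not_byteOK a (by omega) (by omega) h0
  · apply Classical.byContradiction
    intro hgt
    exact hs.not_byteOK (a + n - 1) (by omega) (by omega) hl

/-- **THE LEMMA THE PROOF RESTS ON: a passed check discharges the side condition of the access that follows.** For a layout
that maps at least the low 12 MB. -/
theorem Accessible.has {L : Layout} {mem : Mem} {w : Word} {n : Nat} (h : Accessible mem w.toNat n) (hs : Sealed mem)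
    (hn : 0 < n) (hL : 0xC00000 ≤ L.hi) : L.Has w n := by
  have := h.inside hs hn
  unfold Layout.Has Layout.lo
  omega

theorem AccessibleSmall.has {L : Layout} {mem : Mem} {w : Word} {n : Nat} (h : AccessibleSmall mem w.toNat n) (hs : Sealed mem)
    (hn : 0 < n) (hL : 0xC00000 ≤ L.hi) : L.Has w n :=
  h.acc.has hs hn hL

/-- The start layout (8 pages of 2 MB) maps the low 16 MB. -/
theorem startLayout_hi (c : Nat) (hc : c = 0 ∨ c = 3) : (startLayout c hc).hi = 0x1000000 := by
  have hp : (startLayout c hc).pages = 8 := rfl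
  unfold Layout.hi
  rw [hp]

/-- The same for the start layout. -/
theorem Accessible.has_start {c : Nat} {hc : c = 0 ∨ c = 3} {mem : Mem} {w : Word} {n : Nat}
    (h : Accessible mem w.toNat n) (hs : Sealed mem) (hn : 0 < n) : (startLayout c hc).Has w n :=
  h.has hs hn (by rw [startLayout_hi]; omega)

theorem AccessibleSmall.has_start {c : Nat} {hc : c = 0 ∨ c = 3} {mem : Mem} {w : Word} {n : Nat}
    (h : AccessibleSmall mem w.toNat n) (hs : Sealed mem) (hn : 0 < n) : (startLayout c hc).Has w n :=
  h.acc.has_start hs hn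

/-- Without the shadow: live bytes are inside the user region (for code that is not checked: the compiler's own prologue
stores, the runtime). -/
theorem Covers.has {L : Layout} {Live : Nat → Prop} {mem : Mem} (hc : Covers Live mem) {w : Word} {n : Nat} (hn : 0 < n)
    (h : InLive Live w.toNat n) (hL : 0xC00000 ≤ L.hi) : L.Has w n := by
  have h0 := hc.inside (w.toNat + 0) (h 0 hn)
  have hl := hc.inside (w.toNat + (n - 1)) (h (n - 1) (by omega))
  unfold Layout.Has Layout.lo
  omega

theorem Covers.has_start {c : Nat} {hc : c = 0 ∨ c = 3} {Live : Nat → Prop} {mem : Mem} (hcov : Covers Live mem) {w : Word}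
    {n : Nat} (hn : 0 < n) (h : InLive Live w.toNat n) : (startLayout c hc).Has w n :=
  hcov.has hn h (by rw [startLayout_hi]; omega)

/-- The shadow bytes of the addresses `[lo, hi)`, as a window of a footprint (`Mem.SameExcept`): what a function that poisons
and unpoisons its own stack frame, or an arena block, may write besides the bytes themselves. -/
def shadowSpan (lo hi : Nat) : Span := ⟨0xC00000 + lo / 8, 0xC00000 + (hi + 7) / 8⟩

/-! ### Frame: stores outside the shadow -/

/-- The shadow bytes are the same in two memories that agree on `[C00000H, E00000H)`. -/
theorem shadowOf_eqOn {mem mem' : Mem} (h : Mem.EqOn 0xC00000 0xE00000 mem mem') (g : Nat) (hg : g < 0x200000) :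
    shadowOf mem' g = shadowOf mem g := by
  unfold shadowOf
  have e := shadowAddr_toNat g hg
  rw [h (shadowAddr g) (by omega) (by omega)]

theorem ByteOK.eqOn {mem mem' : Mem} (h : Mem.EqOn 0xC00000 0xE00000 mem mem') {a : Nat} (ha : a < 0x1000000)
    (hb : ByteOK mem a) : ByteOK mem' a := by
  unfold ByteOK shadowByte at *
  rw [shadowOf_eqOn h (a / 8) (by omega)]
  exact hb

theorem GranOK.eqOn {mem mem' : Mem} (h : Mem.EqOn 0xC00000 0xE00000 mem mem') {a : Nat} (ha : a < 0x1000000)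
    (hb : GranOK mem a) : GranOK mem' a := by
  unfold GranOK shadowByte at *
  rw [shadowOf_eqOn h (a / 8) (by omega)]
  exact hb

/-- **A store outside the shadow keeps what a check decides.** -/
theorem Accessible.eqOn {mem mem' : Mem} {a n : Nat} (hacc : Accessible mem a n) (hn : 0 < n)
    (h : Mem.EqOn 0xC00000 0xE00000 mem mem') : Accessible mem' a n := by
  have htop := hacc.top
  refine ⟨htop, ?_, hacc.last.eqOn h (by omega)⟩
  intro g hg1 hg2
  rw [shadowOf_eqOn h g (by omega)]
  exact hacc.full g hg1 hg2

theorem AccessibleSmall.eqOn {mem mem' : Mem} {a n : Nat} (hacc : AccessibleSmall mem a n) (hn : 0 < n)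
    (h : Mem.EqOn 0xC00000 0xE00000 mem mem') : AccessibleSmall mem' a n :=
  ⟨hacc.ceiling, hacc.acc.eqOn hn h⟩

/-- **A store outside the shadow keeps the cover.** -/
theorem Covers.eqOn {Live : Nat → Prop} {mem mem' : Mem} (hc : Covers Live mem) (h : Mem.EqOn 0xC00000 0xE00000 mem mem') :
    Covers Live mem' := by
  refine ⟨hc.inside, ?_⟩
  intro a ha
  have := hc.inside a ha
  exact (hc.ok a ha).eqOn h (by omega)

/-- **A store outside the shadow keeps the seal.** -/
theorem Sealed.eqOn {mem mem' : Mem} (hs : Sealed mem) (h : Mem.EqOn 0xC00000 0xE00000 mem mem') : Sealed mem' := by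
  intro g hg hout
  rw [shadowOf_eqOn h g hg]
  exact hs g hg hout

/-- The form a walker meets: one store `writeLE a k v` whose range lies below or above the shadow. -/
theorem eqOn_shadow_writeLE (mem : Mem) (a : Word) (k v : Nat) (hk : a.toNat + k < 2 ^ 64)
    (hd : a.toNat + k ≤ 0xC00000 ∨ 0xE00000 ≤ a.toNat) : Mem.EqOn 0xC00000 0xE00000 mem (mem.writeLE a k v) :=
  Mem.EqOn.writeLE 0xC00000 0xE00000 mem a k v hk hd

/-! ### Frame: stores of shadow bytes -/

/-- **A store of one shadow byte changes exactly one granule.** -/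
theorem shadowOf_write (mem : Mem) (g g' : Nat) (v : Byte) (hg : g < 0x200000) (hg' : g' < 0x200000) :
    shadowOf (mem.write (shadowAddr g) v) g' = if g' = g then v.toNat else shadowOf mem g' := by
  unfold shadowOf
  by_cases e : g' = g
  · subst e
    rw [Mem.read_write_same]
    simp only [if_true]
  · rw [Mem.read_write_other _ _ _ _ (shadowAddr_ne g g' hg hg' (fun h => e h.symm))]
    simp only [e, if_false]

/-- **A store of `k` shadow bytes at once** (the compiler's prologues poison a frame with 4- and 8-byte stores): granule
`g + i` gets byte `i` of `v`, every other granule is unchanged. -/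
theorem shadowOf_writeLE (mem : Mem) (g k v g' : Nat) (hg : g + k ≤ 0x200000) (hg' : g' < 0x200000) :
    shadowOf (mem.writeLE (shadowAddr g) k v) g' =
      if g ≤ g' ∧ g' < g + k then v / 256 ^ (g' - g) % 256 else shadowOf mem g' := by
  unfold shadowOf
  by_cases hin : g ≤ g' ∧ g' < g + k
  · have e : shadowAddr g' = shadowAddr g + UInt64.ofNat (g' - g) := by
      rw [shadowAddr_add]
      congr 1
      omega
    rw [e, read_writeLE_in _ _ _ _ _ (by omega) (by omega)]
    simp only [hin, and_self, if_true]
    rw [UInt8.toNat_ofNat']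
    omega
  · simp only [hin, if_false]
    by_cases hk : k = 0
    · subst hk
      rfl
    · have ea := shadowAddr_toNat g (by omega)
      have eb := shadowAddr_toNat g' hg'
      have hnw : Mem.NoWrap (shadowAddr g) k := by
        unfold Mem.NoWrap
        omega
      rw [Mem.read_writeLE_disjoint_noWrap mem (shadowAddr g) k v (shadowAddr g') hnw (by omega)]

/-- **The cover after a store of one shadow byte.** The new live set may contain, of granule `g`, only bytes the new value makes
accessible; everything else it contains was live before. (Poisoning: `Live'` = `Live` without the granule. Unpoisoning: `Live'`
= `Live` plus the first `v` — or, for `v = 0`, all eight — bytes of the granule.) -/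
theorem Covers.write {Live Live' : Nat → Prop} {mem : Mem} (hc : Covers Live mem) (g : Nat) (v : Byte)
    (hg : g < 0x200000)
    (hin : ∀ a, Live' a → 0x100000 ≤ a ∧ a < 0xC00000)
    (hnew : ∀ a, Live' a → a / 8 = g → GranOKv v.toNat a)
    (hold : ∀ a, Live' a → a / 8 ≠ g → Live a) :
    Covers Live' (mem.write (shadowAddr g) v) := by
  refine ⟨hin, ?_⟩
  intro a ha
  have hia := hin a ha
  unfold GranOK shadowByte
  rw [shadowOf_write mem g (a / 8) v hg (by omega)]
  by_cases e : a / 8 = g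
  · simp only [e, if_true]
    exact hnew a ha e
  · simp only [e, if_false]
    exact hc.ok a (hold a ha e)

/-- The same for a store of `k` shadow bytes at once. -/
theorem Covers.writeLE {Live Live' : Nat → Prop} {mem : Mem} (hc : Covers Live mem) (g k v : Nat)
    (hg : g + k ≤ 0x200000)
    (hin : ∀ a, Live' a → 0x100000 ≤ a ∧ a < 0xC00000)
    (hnew : ∀ a, Live' a → g ≤ a / 8 → a / 8 < g + k → GranOKv (v / 256 ^ (a / 8 - g) % 256) a)
    (hold : ∀ a, Live' a → (a / 8 < g ∨ g + k ≤ a / 8) → Live a) :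
    Covers Live' (mem.writeLE (shadowAddr g) k v) := by
  refine ⟨hin, ?_⟩
  intro a ha
  have hia := hin a ha
  unfold GranOK shadowByte
  rw [shadowOf_writeLE mem g k v (a / 8) hg (by omega)]
  by_cases e : g ≤ a / 8 ∧ a / 8 < g + k
  · simp only [e, and_self, if_true]
    exact hnew a ha e.1 e.2
  · simp only [e, if_false]
    exact hc.ok a (hold a ha (by omega))

/-- **The seal after a store of shadow bytes**: kept when the granules written belong to `[100000H, C00000H)`. -/
theorem Sealed.write {mem : Mem} (hs : Sealed mem) (g : Nat) (v : Byte) (h1 : 0x20000 ≤ g) (h2 : g < 0x180000) :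
    Sealed (mem.write (shadowAddr g) v) := by
  intro g' hg' hout
  rw [shadowOf_write mem g g' v (by omega) hg']
  have e : ¬ g' = g := by omega
  simp only [e, if_false]
  exact hs g' hg' hout

theorem Sealed.writeLE {mem : Mem} (hs : Sealed mem) (g k v : Nat) (h1 : 0x20000 ≤ g) (h2 : g + k ≤ 0x180000) :
    Sealed (mem.writeLE (shadowAddr g) k v) := by
  intro g' hg' hout
  rw [shadowOf_writeLE mem g k v g' (by omega) hg']
  have e : ¬ (g ≤ g' ∧ g' < g + k) := by omega
  simp only [e, if_false]
  exact hs g' hg' hout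

/-! ### What the machine computes -/

/-- The shadow address as the check routines and the compiler's prologues compute it: `(addr >> 3) + 0xC00000`. -/
theorem shr3_add_offset (w : Word) : (w >>> 3) + 0xC00000 = shadowAddr (w.toNat / 8) := by
  apply eq_shadowAddr
  have h3 : (w >>> 3).toNat = w.toNat / 8 := by
    rw [UInt64.toNat_shiftRight]
    simp [Nat.shiftRight_eq_div_pow]
  have := w.toNat_lt
  rw [UInt64.toNat_add, h3]
  simp only [UInt64.reduceToNat]
  omega

end Asan
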